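-- pv_equiv track=rewrite | github.com/smileformylove/MemScreen | memscreen/memory/context_retriever.py | _format_structured
-- ===== SOURCE A (Python) =====
-- from collections import defaultdict
-- from typing import Any, Dict, List, Optional, Tuple
--
-- def _format_structured(context: Dict[str, Any]) -> str:
--     """Format context in structured format by category."""
--     items = context.get("context_items", [])
--
--     # Group by category
--     by_category = defaultdict(list)
--     for item in items:
--         category = item.get("category", "general")
--         by_category[category].append(item)
--
--     # Build formatted string
--     sections = []
--     for category, items in by_category.items():
--         if items:
--             section = f"## {category.title()}\n"
--             for item in items[:3]:  # Top 3 per category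
--                 section += f"- {item.get('content', '')}\n"
--             sections.append(section)
--
--     return "\n".join(sections)
-- ===== SOURCE B (Python) =====
-- def _format_structured(context):
--     """Format context in structured format by category."""
--     items = context.get("context_items", [])
--
--     # Single streaming pass: ordered [category, line-count, section-text] triples,
--     # each section capped at 3 lines as it is built; no grouping dict, no post-pass.
--     secs = []
--     for item in items:
--         c = item.get("category", "general")
--         for s in secs:
--             if s[0] == c:
--                 if s[1] < 3:
--                     s[1] += 1
--                     s[2] += "- " + item.get("content", "") + "\n"
--                 break
--         else:
--             secs.append([c, 1, "## " + c.title() + "\n" + "- " + item.get("content", "") + "\n"])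
--
--     return "\n".join(s[2] for s in secs)
-- ===== Notes on version B (the rewrite author's own statement) =====
-- stated objective: alternative
-- what changed: Replaces A's two-stage defaultdict grouping plus section-building pass with a single streaming pass that maintains an ordered list of (category, line-count, section-text) triples, capping each section at 3 lines while it is built.
import Mathlib
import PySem

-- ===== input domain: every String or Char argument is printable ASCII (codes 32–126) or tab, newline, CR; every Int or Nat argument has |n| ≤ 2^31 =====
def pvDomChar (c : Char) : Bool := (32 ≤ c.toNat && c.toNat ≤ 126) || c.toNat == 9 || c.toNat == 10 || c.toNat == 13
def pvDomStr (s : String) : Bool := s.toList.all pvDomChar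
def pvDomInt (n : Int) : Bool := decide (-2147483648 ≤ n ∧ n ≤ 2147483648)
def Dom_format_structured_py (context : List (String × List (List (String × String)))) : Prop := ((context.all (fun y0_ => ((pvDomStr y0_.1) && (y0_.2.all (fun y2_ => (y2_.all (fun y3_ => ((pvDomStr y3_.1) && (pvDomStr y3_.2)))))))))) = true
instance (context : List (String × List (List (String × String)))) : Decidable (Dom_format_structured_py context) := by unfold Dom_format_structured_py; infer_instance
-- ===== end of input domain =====

-- B replaces A's two-stage defaultdict grouping + section-building pass with one streaming pass
-- over the items that maintains an ordered list of (category, count, section-text) triples,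
-- capping each section at 3 lines as it is built; same return value, no speed claim (alternative).

-- shared helper: hand port of str.title(), exact on the ASCII domain (a character is cased iff
-- it is an ASCII letter there; both Pythons call .title() identically)
def pyTitleGo : Bool → List Char → List Char
  | _, [] => []
  | prevCased, c :: cs =>
    if PySem.Chars.isalpha c then
      (if prevCased then PySem.Chars.lowerChar c else PySem.Chars.upperChar c) :: pyTitleGo true cs
    else c :: pyTitleGo false cs

def pyTitle (s : String) : String := String.ofList (pyTitleGo false s.toList)

-- ===== PORT A =====
def format_structured_py (context : List (String × List (List (String × String)))) : String :=
  let items := (PySem.Dict.ofList context).getD "context_items" []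
  let by_category := items.foldl
    (fun d item =>
      let category := (PySem.Dict.ofList item).getD "category" "general"
      d.modify category [] (fun l => l ++ [item]))
    PySem.Dict.empty
  let sections := by_category.items.foldl
    (fun sections p =>
      if p.2.isEmpty = false then
        let section0 := "## " ++ pyTitle p.1 ++ "\n"
        let section1 := (PySem.List.slice p.2 none (some 3)).foldl
          (fun s item => s ++ ("- " ++ (PySem.Dict.ofList item).getD "content" "" ++ "\n"))
          section0
        sections ++ [section1]
      else sections)
    []
  PySem.Str.join "\n" sections

-- ===== PORT B =====
-- the inner `for s in secs: … break / else: append` loop of Source B, as structural recursion;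
-- the count is a small non-negative line counter, Nat is exact for it
def pvBStep (c line : String) : List (String × Nat × String) → List (String × Nat × String)
  | [] => [(c, 1, "## " ++ pyTitle c ++ "\n" ++ line)]
  | s :: rest =>
    if s.1 == c then
      (if s.2.1 < 3 then (s.1, s.2.1 + 1, s.2.2 ++ line) else s) :: rest
    else s :: pvBStep c line rest

def format_structured_py_alt (context : List (String × List (List (String × String)))) : String :=
  let items := (PySem.Dict.ofList context).getD "context_items" []
  let secs := items.foldl
    (fun secs item =>
      pvBStep ((PySem.Dict.ofList item).getD "category" "general")
              ("- " ++ (PySem.Dict.ofList item).getD "content" "" ++ "\n")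
              secs)
    []
  PySem.Str.join "\n" (secs.map (fun s => s.2.2))

-- ===== PRECONDITION & SPEC =====
def Spec_format_structured_py (context : List (String × List (List (String × String)))) (out : String) : Prop := out = format_structured_py_alt context
instance (context : List (String × List (List (String × String)))) (out : String) : Decidable (Spec_format_structured_py context out) := by unfold Spec_format_structured_py; infer_instance

-- ===== CLAIM (what is proved, stated in full; the proofs are below) =====
def Claim_equal_format_structured_py : Prop := ∀ (context : List (String × List (List (String × String)))), Dom_format_structured_py context → Spec_format_structured_py context (format_structured_py context)

-- ===== LEMMAS AND PROOFS =====

-- category / line / section-head lookups, named for the proofs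
def pvCat (item : List (String × String)) : String :=
  (PySem.Dict.ofList item).getD "category" "general"
def pvLine (item : List (String × String)) : String :=
  "- " ++ (PySem.Dict.ofList item).getD "content" "" ++ "\n"
def pvHead (c : String) : String := "## " ++ pyTitle c ++ "\n"

-- the common characterisation both ports are reduced to: one triple per category
def pvEntry (items : List (List (String × String))) (c : String) : String × Nat × String :=
  (c, ((items.filter (fun it => pvCat it == c)).take 3).length,
    pvHead c ++ PySem.Str.join "" (((items.filter (fun it => pvCat it == c)).take 3).map pvLine))

def pvF (items : List (List (String × String))) : List (String × Nat × String) :=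
  (PySem.Set.ofList (items.map pvCat)).map (pvEntry items)

theorem str_ext {a b : String} (h : a.toList = b.toList) : a = b := by
  rw [← String.ofList_toList (s := a), ← String.ofList_toList (s := b), h]

theorem join_empty_nil : PySem.Str.join "" ([] : List String) = "" := by
  apply str_ext; simp [PySem.Str.toList_join, PySem.Chars.join_nil]

theorem join_empty_cons (a : String) (l : List String) :
    PySem.Str.join "" (a :: l) = a ++ PySem.Str.join "" l := by
  apply str_ext
  cases l with
  | nil => simp [PySem.Str.toList_join, PySem.Chars.join, String.toList_append, List.intercalate]
  | cons b t =>
      simp [PySem.Str.toList_join, String.toList_append, PySem.Chars.join_cons_cons]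

theorem join_empty_snoc (l : List String) (a : String) :
    PySem.Str.join "" (l ++ [a]) = PySem.Str.join "" l ++ a := by
  induction l with
  | nil => simp [join_empty_cons, join_empty_nil]
  | cons x t ih => simp [join_empty_cons, ih, String.append_assoc]

theorem foldl_str {α : Type} (l : List α) (f : α → String) :
    ∀ s : String, l.foldl (fun acc x => acc ++ f x) s = s ++ PySem.Str.join "" (l.map f) := by
  induction l with
  | nil => intro s; simp [join_empty_nil]
  | cons x t ih =>
      intro s
      simp only [List.foldl_cons, List.map_cons, ih, join_empty_cons, String.append_assoc]

-- ===== A reduced to the characterisation =====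
theorem A_eq (context : List (String × List (List (String × String)))) :
    format_structured_py context
      = PySem.Str.join "\n"
          ((pvF ((PySem.Dict.ofList context).getD "context_items" [])).map (fun s => s.2.2)) := by
  show PySem.Str.join "\n"
      ((((PySem.Dict.ofList context).getD "context_items" []).foldl
          (fun d item => d.modify (pvCat item) [] (fun l => l ++ [item]))
          PySem.Dict.empty).items.foldl
        (fun sections p =>
          if p.2.isEmpty = false then
            sections ++ [(PySem.List.slice p.2 none (some 3)).foldl
              (fun s item => s ++ pvLine item) ("## " ++ pyTitle p.1 ++ "\n")]
          else sections)
        [])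
    = _
  generalize ((PySem.Dict.ofList context).getD "context_items" []) = items
  have hfold : items.foldl (fun d item => d.modify (pvCat item) [] (fun l => l ++ [item])) PySem.Dict.empty
      = (items.map (fun it => (pvCat it, it))).foldl
          (fun d p => d.modify p.1 [] (fun l => l ++ [p.2])) PySem.Dict.empty := by
    rw [List.foldl_map]
  have hkeys : (items.foldl (fun d item => d.modify (pvCat item) [] (fun l => l ++ [item])) PySem.Dict.empty).keys
      = PySem.Set.ofList (items.map pvCat) := by
    rw [PySem.Dict.keys_foldl_modify_key items pvCat [] (fun _ item l => l ++ [item]) PySem.Dict.empty,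
        PySem.Dict.keys_empty]
    rfl
  have hnodup : (items.foldl (fun d item => d.modify (pvCat item) [] (fun l => l ++ [item])) PySem.Dict.empty).keys.Nodup :=
    PySem.Dict.nodup_keys_foldl_modify_key items pvCat [] (fun _ item l => l ++ [item]) PySem.Dict.empty
      PySem.Dict.nodup_keys_empty
  have hgetD : ∀ c, (items.foldl (fun d item => d.modify (pvCat item) [] (fun l => l ++ [item])) PySem.Dict.empty).getD c []
      = items.filter (fun it => pvCat it == c) := by
    intro c
    rw [hfold, PySem.Dict.getD_foldl_modify_append, PySem.Dict.getD_empty]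
    simp [List.filter_map, List.map_map, Function.comp_def]
  have hitems : (items.foldl (fun d item => d.modify (pvCat item) [] (fun l => l ++ [item])) PySem.Dict.empty).items
      = (PySem.Set.ofList (items.map pvCat)).map
          (fun c => (c, items.filter (fun it => pvCat it == c))) := by
    rw [PySem.Dict.items_eq_map_keys _ hnodup [], hkeys]
    exact List.map_congr_left (fun c _ => by rw [hgetD c])
  rw [hitems, List.foldl_map]
  rw [PySem.List.foldl_congr_mem _ _
      (fun sections c => sections ++
        [(PySem.List.slice (items.filter (fun it => pvCat it == c)) none (some 3)).foldl
          (fun s item => s ++ pvLine item) ("## " ++ pyTitle c ++ "\n")]) _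
      ?_]
  · rw [PySem.List.foldl_append_singleton_eq_map, List.nil_append]
    unfold pvF
    rw [List.map_map]
    refine congrArg _ (List.map_congr_left (fun c _ => ?_))
    rw [foldl_str]
    have hsl : PySem.List.slice (items.filter (fun x => pvCat x == c)) none (some 3)
        = (items.filter (fun x => pvCat x == c)).take 3 := by
      simpa using PySem.List.slice_to (xs := items.filter (fun x => pvCat x == c))
        (b := 3) (by norm_num)
    rw [hsl]
    rfl
  · intro acc c hc
    have hc' : c ∈ items.map pvCat := (PySem.Set.mem_ofList _ _).mp hc
    obtain ⟨it, hit, rfl⟩ := List.mem_map.mp hc'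
    have hne : items.filter (fun x => pvCat x == pvCat it) ≠ [] := by
      intro h
      have := List.filter_eq_nil_iff.mp h it hit
      simp at this
    simp [List.isEmpty_eq_false_iff, hne]

-- ===== B reduced to the characterisation =====
theorem bStep_new (c line : String) (l : List (String × Nat × String))
    (h : ∀ s ∈ l, s.1 ≠ c) :
    pvBStep c line l = l ++ [(c, 1, "## " ++ pyTitle c ++ "\n" ++ line)] := by
  induction l with
  | nil => rfl
  | cons s t ih =>
      have hs : (s.1 == c) = false := by
        simp [h s (List.mem_cons_self)]
      simp [pvBStep, hs, ih (fun x hx => h x (List.mem_cons_of_mem _ hx))]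

theorem bStep_map (c line : String) (g g' : String → String × Nat × String)
    (hg : ∀ k, (g k).1 = k)
    (h1 : ∀ k, k ≠ c → g' k = g k)
    (h2 : g' c = if (g c).2.1 < 3 then ((g c).1, (g c).2.1 + 1, (g c).2.2 ++ line) else g c) :
    ∀ ks : List String, ks.Nodup → c ∈ ks →
      pvBStep c line (ks.map g) = ks.map g' := by
  intro ks
  induction ks with
  | nil => intro _ hmem; cases hmem
  | cons k t ih =>
      intro hnd hmem
      by_cases hk : k = c
      · subst hk
        have : ((g k).1 == k) = true := by simp [hg k]
        simp only [List.map_cons, pvBStep, this, if_true]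
        have ht : t.map g' = t.map g := by
          refine List.map_congr_left (fun x hx => ?_)
          exact h1 x (fun hxc => (List.nodup_cons.mp hnd).1 (hxc ▸ hx))
        rw [ht, h2]
      · have : ((g k).1 == c) = false := by simp [hg k, hk]
        have hmem' : c ∈ t := by
          cases hmem with
          | head => exact absurd rfl hk
          | tail _ h => exact h
        simp only [List.map_cons, pvBStep, this, Bool.false_eq_true, if_false]
        rw [ih (List.nodup_cons.mp hnd).2 hmem', h1 k hk]

theorem step_entry (done : List (List (String × String))) (it : List (String × String)) :
    pvBStep (pvCat it) (pvLine it) (pvF done) = pvF (done ++ [it]) := by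
  have hcats : (done ++ [it]).map pvCat = done.map pvCat ++ [pvCat it] := by simp
  by_cases hc : pvCat it ∈ done.map pvCat
  · -- category seen before: the key set is unchanged, one entry is updated
    have hset : PySem.Set.ofList ((done ++ [it]).map pvCat) = PySem.Set.ofList (done.map pvCat) := by
      rw [hcats, PySem.Set.ofList_eq_foldl, List.foldl_append, ← PySem.Set.ofList_eq_foldl]
      simp only [List.foldl_cons, List.foldl_nil, PySem.Set.add]
      rw [if_pos]
      simpa [PySem.Set.contains] using (PySem.Set.mem_ofList _ _).mpr hc
    unfold pvF
    rw [hset]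
    refine bStep_map (pvCat it) (pvLine it) (pvEntry done) (pvEntry (done ++ [it]))
      (fun k => rfl) ?_ ?_ _ (PySem.Set.nodup_ofList _) ((PySem.Set.mem_ofList _ _).mpr hc)
    · intro k hk
      have hfilter : (done ++ [it]).filter (fun x => pvCat x == k)
          = done.filter (fun x => pvCat x == k) := by
        rw [List.filter_append]
        simp [Ne.symm hk]
      simp [pvEntry, hfilter]
    · have hfilter : (done ++ [it]).filter (fun x => pvCat x == pvCat it)
          = done.filter (fun x => pvCat x == pvCat it) ++ [it] := by
        rw [List.filter_append]; simp
      simp only [pvEntry]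
      rw [hfilter]
      generalize done.filter (fun x => pvCat x == pvCat it) = f
      by_cases h3 : f.length < 3
      · have htake : f.take 3 = f := List.take_of_length_le (by omega)
        have htake' : (f ++ [it]).take 3 = f ++ [it] :=
          List.take_of_length_le (by simp; omega)
        rw [htake, htake', if_pos (by simpa [htake] using h3)]
        simp [List.map_append, join_empty_snoc, String.append_assoc]
      · have htake' : (f ++ [it]).take 3 = f.take 3 :=
          List.take_append_of_le_length (by omega)
        have hlen : (f.take 3).length = 3 := by simp; omega
        rw [htake', if_neg (by omega)]
  · -- new category: appended at the end
    have hset : PySem.Set.ofList ((done ++ [it]).map pvCat)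
        = PySem.Set.ofList (done.map pvCat) ++ [pvCat it] := by
      rw [hcats, PySem.Set.ofList_eq_foldl, List.foldl_append, ← PySem.Set.ofList_eq_foldl]
      simp only [List.foldl_cons, List.foldl_nil, PySem.Set.add]
      rw [if_neg]
      intro hcont
      exact hc ((PySem.Set.mem_ofList _ _).mp (by simpa [PySem.Set.contains] using hcont))
    have hnew : pvBStep (pvCat it) (pvLine it) (pvF done)
        = pvF done ++ [(pvCat it, 1, "## " ++ pyTitle (pvCat it) ++ "\n" ++ pvLine it)] := by
      refine bStep_new _ _ _ (fun s hs => ?_)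
      obtain ⟨k, hk, rfl⟩ := List.mem_map.mp hs
      have : k ∈ done.map pvCat := (PySem.Set.mem_ofList _ _).mp hk
      exact fun h => hc (h ▸ this)
    rw [hnew]
    unfold pvF
    rw [hset, List.map_append, List.map_singleton]
    refine congrArg₂ (· ++ ·) ?_ ?_
    · refine List.map_congr_left (fun k hk => ?_)
      have hkne : pvCat it ≠ k := by
        intro h
        exact hc (h ▸ (PySem.Set.mem_ofList _ _).mp hk)
      have hfilter : (done ++ [it]).filter (fun x => pvCat x == k)
          = done.filter (fun x => pvCat x == k) := by
        rw [List.filter_append]; simp [hkne]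
      simp [pvEntry, hfilter]
    · have hfilter : (done ++ [it]).filter (fun x => pvCat x == pvCat it) = [it] := by
        rw [List.filter_append, List.filter_eq_nil_iff.mpr, List.nil_append]
        · simp
        · intro x hx h
          exact hc (List.mem_map.mpr ⟨x, hx, by simpa using h⟩)
      simp [pvEntry, hfilter, pvHead, join_empty_cons, join_empty_nil, String.append_assoc]

theorem fold_inv (rest : List (List (String × String))) :
    ∀ done, rest.foldl (fun secs item => pvBStep (pvCat item) (pvLine item) secs) (pvF done)
      = pvF (done ++ rest) := by
  induction rest with
  | nil => intro done; simp
  | cons it t ih =>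
      intro done
      simp only [List.foldl_cons]
      rw [step_entry, ih (done ++ [it])]
      simp

theorem B_eq (context : List (String × List (List (String × String)))) :
    format_structured_py_alt context
      = PySem.Str.join "\n"
          ((pvF ((PySem.Dict.ofList context).getD "context_items" [])).map (fun s => s.2.2)) := by
  show PySem.Str.join "\n"
      ((((PySem.Dict.ofList context).getD "context_items" []).foldl
          (fun secs item => pvBStep (pvCat item) (pvLine item) secs) []).map (fun s => s.2.2))
    = _
  generalize ((PySem.Dict.ofList context).getD "context_items" []) = items
  have h0 : pvF [] = [] := rfl
  rw [← h0, fold_inv items [], List.nil_append]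

-- ===== VERDICT (by name: the statement is the Claim_ definition above) =====
theorem format_structured_py_spec : Claim_equal_format_structured_py := by
  intro context _
  show format_structured_py context = format_structured_py_alt context
  rw [A_eq, B_eq]
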